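-- pv_equiv track=rewrite | github.com/MixaBr/Lesson24 | exam_1.py | famil
-- ===== SOURCE A (Python) =====
-- def famil(surname):
--     surname = surname.capitalize()
--     s = ""
--     for i in surname:
--         if i.isupper():
--             s += i
--         else:
--             s += "*"
--     return s
-- ===== SOURCE B (Python) =====
-- def famil(surname):
--     sc = surname.capitalize()
--     if not sc:
--         return ""
--     return (sc[0] if sc[0].isupper() else "*") + "*" * (len(sc) - 1)
-- ===== Notes on version B (the rewrite author's own statement) =====
-- stated objective: simpler
-- what changed: Replaces the per-character loop with a closed form: after capitalize() only index 0 can be uppercase, so B tests just sc[0] and appends len(sc)-1 asterisks via one string repetition.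
import Mathlib
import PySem

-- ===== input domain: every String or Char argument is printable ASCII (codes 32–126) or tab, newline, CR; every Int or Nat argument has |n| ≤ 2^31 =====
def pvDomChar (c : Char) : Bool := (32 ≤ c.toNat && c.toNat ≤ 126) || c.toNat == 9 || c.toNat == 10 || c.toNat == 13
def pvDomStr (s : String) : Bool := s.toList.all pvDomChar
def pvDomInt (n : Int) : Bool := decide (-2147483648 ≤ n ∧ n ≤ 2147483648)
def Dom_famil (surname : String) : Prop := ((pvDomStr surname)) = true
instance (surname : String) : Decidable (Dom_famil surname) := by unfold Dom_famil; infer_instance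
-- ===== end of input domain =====

-- B replaces A's per-character loop by one uppercase test on the first character plus a repeated '*' (simpler closed form).

-- ===== PORT A =====
-- str.capitalize(): first char uppercased, the rest lowercased — exact on the ASCII domain
def pvCapitalize (cs : List Char) : List Char :=
  match cs with
  | [] => []
  | c :: rest => PySem.Chars.upperChar c :: rest.map PySem.Chars.lowerChar

def famil (surname : String) : String :=
  String.mk ((pvCapitalize surname.toList).foldl
    (fun s i => s ++ [if PySem.Chars.isupper i then i else '*']) [])

-- ===== PORT B =====
def famil_alt (surname : String) : String :=
  match pvCapitalize surname.toList with
  | [] => ""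
  | c :: rest =>
      String.mk ((if PySem.Chars.isupper c then c else '*') :: List.replicate rest.length '*')

-- ===== PRECONDITION & SPEC =====
def Spec_famil (surname : String) (out : String) : Prop := out = famil_alt surname
instance (surname : String) (out : String) : Decidable (Spec_famil surname out) := by unfold Spec_famil; infer_instance

-- ===== CLAIM (what is proved, stated in full; the proofs are below) =====
def Claim_equal_famil : Prop := ∀ (surname : String), Dom_famil surname → Spec_famil surname (famil surname)

-- ===== LEMMAS AND PROOFS =====

theorem foldl_append_map (f : Char → Char) (l acc : List Char) :
    l.foldl (fun s i => s ++ [f i]) acc = acc ++ l.map f := by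
  induction l generalizing acc with
  | nil => simp
  | cons c t ih => simp [List.foldl, ih]

theorem isupper_lowerChar (c : Char) :
    PySem.Chars.isupper (PySem.Chars.lowerChar c) = false := by
  unfold PySem.Chars.lowerChar
  by_cases h : PySem.Chars.isupper c = true
  · simp only [h, if_pos]
    have hc : 65 ≤ c.toNat := by
      unfold PySem.Chars.isupper at h
      rw [Bool.and_eq_true, decide_eq_true_iff, decide_eq_true_iff] at h
      have := UInt32.le_iff_toNat_le.mp (Char.le_def.mp h.1)
      simpa using this
    have hcu : c.toNat ≤ 90 := by
      unfold PySem.Chars.isupper at h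
      rw [Bool.and_eq_true, decide_eq_true_iff, decide_eq_true_iff] at h
      have := UInt32.le_iff_toNat_le.mp (Char.le_def.mp h.2)
      simpa using this
    have hv : (Char.ofNat (c.toNat + 32)).toNat = c.toNat + 32 := by
      rw [Char.toNat_ofNat, if_pos (Or.inl (by omega : c.toNat + 32 < 0xD800))]
    unfold PySem.Chars.isupper
    rw [Bool.and_eq_false_iff]
    right
    rw [decide_eq_false_iff_not]
    intro hle
    rw [Char.le_def] at hle
    have h2 : (Char.ofNat (c.toNat + 32)).toNat ≤ 'Z'.toNat :=
      UInt32.le_iff_toNat_le.mp hle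
    rw [hv] at h2
    rw [show ('Z').toNat = 90 from by decide] at h2
    omega
  · simp [h]

theorem famil_spec : Claim_equal_famil := by
  intro surname _
  unfold Spec_famil famil famil_alt
  cases hcap : pvCapitalize surname.toList with
  | nil => rfl
  | cons c rest =>
      have hrest : ∃ t : List Char, rest = t.map PySem.Chars.lowerChar := by
        cases hs : surname.toList with
        | nil => rw [hs] at hcap; simp [pvCapitalize] at hcap
        | cons a t =>
            rw [hs] at hcap
            simp [pvCapitalize] at hcap
            exact ⟨t, hcap.2.symm⟩
      obtain ⟨t, ht⟩ := hrest
      rw [foldl_append_map]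
      simp [ht, List.map_map, Function.comp_def, isupper_lowerChar]
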